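-- pv_equiv track=rewrite | github.com/Tulgaaaaaaaa/ctf | ctfmn/crypto/shuffle/anlz.py | recover_some_letters
-- ===== SOURCE A (Python) =====
-- def recover_some_letters(data):
--     special_chars = {
--         'one': {'E', 'Y', 'U'},
--         'two': {'X', 'A'},
--         'three': {'N', 'W', 'G'},
--         'four': {'C', 'I', 'R', 'D'},
--         'six': {'L', 'J', 'O', 'T', 'P', 'V'},
--         'eight': {'H', 'F', 'K', 'Q', 'S', 'B', 'M', 'Z'}
--     }
--
--     result = []
--     for i, char in enumerate(data):
--         if char in special_chars['one']:
--             result.append(char)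
--         elif i % 2 == 0 and char in special_chars['two']:
--             result.append(char)
--         elif i % 3 == 0 and char in special_chars['three']:
--             result.append(char)
--         elif i % 4 == 0 and char in special_chars['four']:
--             result.append(char)
--         elif i % 6 == 0 and char in special_chars['six']:
--             result.append(char)
--         elif i % 8 == 0 and char in special_chars['eight']:
--             result.append(char)
--         else:
--             result.append('.')
--
--     return result
-- ===== SOURCE B (Python) =====
-- def recover_some_letters(data):
--     # Staged stride passes: start from an all-dots result, then for each divisor
--     # group overwrite only the positions that are multiples of its divisor and
--     # hold one of its letters.  Correct because the six letter groups are disjoint,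
--     # so at most one pass ever writes a given position.
--     n = len(data)
--     result = ['.'] * n
--     groups = ((1, 'EYU'), (2, 'XA'), (3, 'NWG'), (4, 'CIRD'),
--               (6, 'LJOTPV'), (8, 'HFKQSBMZ'))
--     for d, chars in groups:
--         for i in range(0, n, d):
--             if data[i] in chars:
--                 result[i] = data[i]
--     return result
-- ===== Notes on version B (the rewrite author's own statement) =====
-- stated objective: alternative
-- what changed: Instead of one pass with a six-branch elif cascade per character, B pre-fills an all-dots result and makes six staged stride passes, one per divisor group, writing data[i] only at indices i produced by range(0, n, d) whose character lies in that group; disjointness of the groups makes the write order irrelevant.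
import Mathlib
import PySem

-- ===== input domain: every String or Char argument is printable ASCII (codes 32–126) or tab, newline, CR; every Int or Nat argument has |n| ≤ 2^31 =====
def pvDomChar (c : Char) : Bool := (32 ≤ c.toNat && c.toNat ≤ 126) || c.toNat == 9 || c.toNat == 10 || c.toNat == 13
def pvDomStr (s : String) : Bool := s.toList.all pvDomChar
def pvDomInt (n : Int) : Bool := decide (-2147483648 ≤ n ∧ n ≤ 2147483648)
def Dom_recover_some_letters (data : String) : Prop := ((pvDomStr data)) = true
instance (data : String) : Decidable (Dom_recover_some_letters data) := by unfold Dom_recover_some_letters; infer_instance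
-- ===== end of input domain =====

-- B replaces A's single pass with a per-character elif cascade by six staged stride
-- passes over an all-dots array, one pass per divisor group (objective: alternative; same O(n) cost).

-- ===== PORT A =====
-- the six sets of special_chars (Python set literals)
def pvOne : PySem.Set Char := PySem.Set.ofList ['E', 'Y', 'U']
def pvTwo : PySem.Set Char := PySem.Set.ofList ['X', 'A']
def pvThree : PySem.Set Char := PySem.Set.ofList ['N', 'W', 'G']
def pvFour : PySem.Set Char := PySem.Set.ofList ['C', 'I', 'R', 'D']
def pvSix : PySem.Set Char := PySem.Set.ofList ['L', 'J', 'O', 'T', 'P', 'V']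
def pvEight : PySem.Set Char := PySem.Set.ofList ['H', 'F', 'K', 'Q', 'S', 'B', 'M', 'Z']

-- the loop body's appended value: the elif cascade, branches in Python's order
def pvStepA (i : Int) (c : Char) : String :=
  if c ∈ pvOne then String.ofList [c]
  else if PySem.Int.mod i 2 = 0 ∧ c ∈ pvTwo then String.ofList [c]
  else if PySem.Int.mod i 3 = 0 ∧ c ∈ pvThree then String.ofList [c]
  else if PySem.Int.mod i 4 = 0 ∧ c ∈ pvFour then String.ofList [c]
  else if PySem.Int.mod i 6 = 0 ∧ c ∈ pvSix then String.ofList [c]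
  else if PySem.Int.mod i 8 = 0 ∧ c ∈ pvEight then String.ofList [c]
  else "."

def recover_some_letters (data : String) : List String :=
  (PySem.List.enumerate data.toList).foldl (fun result p => result ++ [pvStepA p.1 p.2]) []

-- ===== PORT B =====
-- B's tuple of (divisor, letter-string) groups
def pvGroups : List (Int × List Char) :=
  [(1, ['E', 'Y', 'U']), (2, ['X', 'A']), (3, ['N', 'W', 'G']),
   (4, ['C', 'I', 'R', 'D']), (6, ['L', 'J', 'O', 'T', 'P', 'V']),
   (8, ['H', 'F', 'K', 'Q', 'S', 'B', 'M', 'Z'])]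

-- one stride pass: for i in range(0, n, d): if data[i] in chars: result[i] = data[i]
-- data[i] is ported as pyGetD l i '.'; every i produced by the range satisfies 0 ≤ i < n,
-- so the default is never used and the access is exact.
def pvPass (l : List Char) (result : List String) (g : Int × List Char) : List String :=
  (PySem.List.pyRange 0 (l.length : Int) g.1).foldl
    (fun r i =>
      if PySem.List.pyGetD l i '.' ∈ g.2 then
        r.set i.toNat (String.ofList [PySem.List.pyGetD l i '.'])
      else r)
    result

def recover_some_letters_alt (data : String) : List String :=
  pvGroups.foldl (pvPass data.toList) (List.replicate data.toList.length ".")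

-- ===== PRECONDITION & SPEC =====
def Spec_recover_some_letters (data : String) (out : List String) : Prop := out = recover_some_letters_alt data
instance (data : String) (out : List String) : Decidable (Spec_recover_some_letters data out) := by unfold Spec_recover_some_letters; infer_instance

-- ===== CLAIM (what is proved, stated in full; the proofs are below) =====
def Claim_equal_recover_some_letters : Prop := ∀ (data : String), Dom_recover_some_letters data → Spec_recover_some_letters data (recover_some_letters data)

-- ===== LEMMAS AND PROOFS =====

-- a fold of conditional writes preserves the length
theorem pvFoldSet_length (p : Int → Prop) [DecidablePred p] (f : Int → String) :
    ∀ (L : List Int) (acc : List String),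
      (L.foldl (fun r i => if p i then r.set i.toNat (f i) else r) acc).length = acc.length := by
  intro L
  induction L with
  | nil => intro acc; rfl
  | cons a L ih =>
      intro acc
      simp only [List.foldl_cons]
      rw [ih]
      by_cases h : p a <;> simp [h]

-- element j of a fold of conditional writes at nonnegative indices: written iff j ∈ L and p j
theorem pvFoldSet_get (p : Int → Prop) [DecidablePred p] (f : Int → String) :
    ∀ (L : List Int), (∀ i ∈ L, 0 ≤ i) → ∀ (acc : List String) (j : Nat),
      (L.foldl (fun r i => if p i then r.set i.toNat (f i) else r) acc)[j]? =
        if (j : Int) ∈ L ∧ p (j : Int) then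
          (if j < acc.length then some (f (j : Int)) else none)
        else acc[j]? := by
  intro L
  induction L with
  | nil => intro _ acc j; simp
  | cons a L ih =>
      intro hpos acc j
      have ha : 0 ≤ a := hpos a (by simp)
      have hL : ∀ i ∈ L, 0 ≤ i := fun i hi => hpos i (by simp [hi])
      simp only [List.foldl_cons]
      rw [ih hL]
      by_cases hmem : (j : Int) ∈ L ∧ p (j : Int)
      · -- final value comes from the tail; only lengths matter for the head step
        have hlen : (if p a then acc.set a.toNat (f a) else acc).length = acc.length := by
          by_cases h : p a <;> simp [h]
        simp [hmem, hlen]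
      · simp only [List.mem_cons]
        by_cases hja : (j : Int) = a
        · subst hja
          have hjt : (j : Int).toNat = j := by omega
          by_cases hp : p (j : Int)
          · have hset : (acc.set j (f (j : Int)))[j]? =
                if j < acc.length then some (f (j : Int)) else none := by
              by_cases hl : j < acc.length
              · simp [List.getElem?_set_self', List.getElem?_eq_getElem hl, hl]
              · simp [List.getElem?_set_self', List.getElem?_eq_none
                  (by omega : acc.length ≤ j), hl]
            simp [hp, hjt, hset]
          · simp [hp, hmem]
        · by_cases hp : p a
          · have hne : a.toNat ≠ j := by omega
            simp [hp, hja, hmem, List.getElem?_set_ne hne]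
          · simp [hp, hja, hmem]

-- membership in range(0, n, d) for positive d: nonnegative multiples of d below n
theorem pvMem_range (n d x : Int) (hd : 0 < d) :
    x ∈ PySem.List.pyRange 0 n d ↔ 0 ≤ x ∧ x < n ∧ d ∣ x := by
  rw [PySem.List.mem_pyRange_iff_of_pos hd]
  constructor
  · rintro ⟨h0, h1, k, hk⟩
    exact ⟨by omega, by omega, k, by omega⟩
  · rintro ⟨h0, h1, k, hk⟩
    exact ⟨by omega, by omega, k, by omega⟩

-- indices in pyRange are nonnegative
theorem pvRange_nonneg (n d : Int) (hd : 0 < d) : ∀ i ∈ PySem.List.pyRange 0 n d, 0 ≤ i := by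
  intro i hi
  exact ((pvMem_range n d i hd).mp hi).1

-- element j of one stride pass
theorem pvPass_get (l : List Char) (acc : List String) (d : Int) (chars : List Char)
    (hd : 0 < d) (j : Nat) :
    (pvPass l acc (d, chars))[j]? =
      if ((j : Int) < (l.length : Int) ∧ d ∣ (j : Int)) ∧ PySem.List.pyGetD l (j : Int) '.' ∈ chars then
        (if j < acc.length then some (String.ofList [PySem.List.pyGetD l (j : Int) '.']) else none)
      else acc[j]? := by
  unfold pvPass
  rw [pvFoldSet_get (fun i => PySem.List.pyGetD l i '.' ∈ chars)
        (fun i => String.ofList [PySem.List.pyGetD l i '.'])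
        _ (pvRange_nonneg _ _ hd) acc j]
  simp [pvMem_range _ _ _ hd, and_assoc]

theorem pvPass_length (l : List Char) (acc : List String) (g : Int × List Char) :
    (pvPass l acc g).length = acc.length := by
  unfold pvPass
  exact pvFoldSet_length _ _ _ _

-- length of B's result
theorem pvAlt_length (data : String) :
    (recover_some_letters_alt data).length = data.toList.length := by
  unfold recover_some_letters_alt
  simp only [pvGroups, List.foldl_cons, List.foldl_nil]
  simp [pvPass_length]

-- pointwise agreement of the two step values at a valid index
theorem pvCell_eq (data : String) (j : Nat) (hj : j < data.toList.length) :
    (recover_some_letters_alt data)[j]? = some (pvStepA (j : Int) data.toList[j]) := by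
  have hn : (j : Int) < (data.toList.length : Int) := by exact_mod_cast hj
  have hc : PySem.List.pyGetD data.toList (j : Int) '.' = data.toList[j] := by
    simp [PySem.List.pyGetD_natCast, List.getD_eq_getElem?_getD, List.getElem?_eq_getElem hj]
  unfold recover_some_letters_alt
  simp only [pvGroups, List.foldl_cons, List.foldl_nil]
  rw [pvPass_get data.toList _ 8 _ (by norm_num) j,
      pvPass_get data.toList _ 6 _ (by norm_num) j,
      pvPass_get data.toList _ 4 _ (by norm_num) j,
      pvPass_get data.toList _ 3 _ (by norm_num) j,
      pvPass_get data.toList _ 2 _ (by norm_num) j,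
      pvPass_get data.toList _ 1 _ (by norm_num) j]
  simp only [pvPass_length, List.length_replicate, hj, if_true, hc,
    List.getElem?_replicate, hn, true_and]
  generalize data.toList[j] = c
  by_cases h : c ∈ (['E', 'Y', 'U', 'X', 'A', 'N', 'W', 'G', 'C', 'I', 'R', 'D',
      'L', 'J', 'O', 'T', 'P', 'V', 'H', 'F', 'K', 'Q', 'S', 'B', 'M', 'Z'] : List Char)
  · fin_cases h <;>
      simp [pvStepA, pvOne, pvTwo, pvThree, pvFour, pvSix, pvEight, PySem.Set.ofList,
        PySem.Int.mod_eq_zero_iff_dvd] <;>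
      split_ifs <;> simp_all
  · simp only [List.mem_cons, List.not_mem_nil, or_false, not_or] at h
    obtain ⟨h1, h2, h3, h4, h5, h6, h7, h8, h9, h10, h11, h12, h13, h14, h15, h16,
      h17, h18, h19, h20, h21, h22, h23, h24, h25, h26⟩ := h
    simp [pvStepA, pvOne, pvTwo, pvThree, pvFour, pvSix, pvEight, PySem.Set.ofList,
      h1, h2, h3, h4, h5, h6, h7, h8, h9, h10, h11, h12, h13, h14, h15, h16,
      h17, h18, h19, h20, h21, h22, h23, h24, h25, h26]

-- ===== VERDICT (by name: the statement is the Claim_ definition above) =====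
theorem recover_some_letters_spec : Claim_equal_recover_some_letters := by
  intro data _
  unfold Spec_recover_some_letters recover_some_letters
  rw [PySem.List.foldl_append_singleton_eq_map]
  apply List.ext_getElem?
  intro j
  simp only [List.nil_append, List.getElem?_map, PySem.List.getElem?_enumerate]
  by_cases hj : j < data.toList.length
  · rw [pvCell_eq data j hj]
    simp [List.getElem?_eq_getElem hj]
  · have h1 : data.toList[j]? = none := List.getElem?_eq_none (by omega)
    have h2 : (recover_some_letters_alt data)[j]? = none :=
      List.getElem?_eq_none (by rw [pvAlt_length]; omega)
    simp [h1, h2]
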